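-- pv_equiv track=rewrite | github.com/hemanthsai126/lumaa-spring-2025-ai-ml | main.py | build_vocab_and_df
-- ===== SOURCE A (Python) =====
-- def build_vocab_and_df(docs):
--     vocab = {}
--     doc_freq = {}
--     current_index = 0
--
--     for tokens in docs:
--         unique_words = set(tokens)
--         # doc frequency
--         for w in unique_words:
--             doc_freq[w] = doc_freq.get(w, 0) + 1
--         # build vocab
--         for w in tokens:
--             if w not in vocab:
--                 vocab[w] = current_index
--                 current_index += 1
--     return vocab, doc_freq
-- ===== SOURCE B (Python) =====
-- def build_vocab_and_df(docs):
--     # Flatten once; vocab order = unique words sorted by their first position in the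
--     # flattened stream (stable sort with an injective key reproduces first-occurrence order).
--     flat = [w for tokens in docs for w in tokens]
--     words = sorted(set(flat), key=flat.index)
--     vocab = {w: i for i, w in enumerate(words)}
--     # doc_freq by inverted loops: for each vocab word, count the documents containing it.
--     doc_freq = {w: sum(1 for tokens in docs if w in tokens) for w in words}
--     return vocab, doc_freq
-- ===== Notes on version B (the rewrite author's own statement) =====
-- stated objective: alternative
-- what changed: Replaces A's fused single pass (running vocab index with membership checks, per-document set updates into doc_freq) by a flatten-then-sort construction: unique words sorted by first position in the flattened stream give the vocab, and doc_freq inverts the loops, counting for each vocab word how many documents contain it.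
import Mathlib
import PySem

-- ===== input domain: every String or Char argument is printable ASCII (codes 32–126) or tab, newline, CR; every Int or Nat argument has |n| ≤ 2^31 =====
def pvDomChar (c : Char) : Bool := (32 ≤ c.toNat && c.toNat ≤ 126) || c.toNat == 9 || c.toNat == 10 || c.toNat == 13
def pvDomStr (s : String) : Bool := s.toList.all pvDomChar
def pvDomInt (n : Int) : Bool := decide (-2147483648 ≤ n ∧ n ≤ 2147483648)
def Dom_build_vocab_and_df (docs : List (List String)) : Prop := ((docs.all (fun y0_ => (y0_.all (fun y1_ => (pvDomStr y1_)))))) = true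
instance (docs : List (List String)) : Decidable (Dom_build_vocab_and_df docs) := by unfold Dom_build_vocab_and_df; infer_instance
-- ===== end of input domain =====

-- B replaces A's fused single pass by a flatten-then-sort construction: the vocab is the unique
-- words sorted (stably) by their first index in the flattened stream, and doc_freq inverts the
-- loops, counting per vocab word how many documents contain it (alternative; not claimed faster).
-- Note: the Python A fills doc_freq iterating each per-document SET in CPython hash order; dict
-- outputs are compared as key→value maps ignoring order, the port realises first-occurrence order.

-- ===== PORT A =====
-- loop body of A's 'for tokens in docs'
def pvAStep (st : PySem.Dict String Int × PySem.Dict String Int × Int) (tokens : List String) :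
    PySem.Dict String Int × PySem.Dict String Int × Int :=
  let unique_words := PySem.Set.ofList tokens
  let doc_freq := unique_words.foldl (fun d w => d.insert w (d.getD w 0 + 1)) st.2.1
  let vi := tokens.foldl
      (fun (p : PySem.Dict String Int × Int) w =>
        if p.1.contains w then p else (p.1.insert w p.2, p.2 + 1))
      (st.1, st.2.2)
  (vi.1, doc_freq, vi.2)

def build_vocab_and_df (docs : List (List String)) : (List (String × Int)) × (List (String × Int)) :=
  let st := docs.foldl pvAStep (PySem.Dict.empty, PySem.Dict.empty, 0)
  (st.1.items, st.2.1.items)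

-- ===== PORT B =====
-- 'sorted(set(flat), key=flat.index)': the key is injective on the set (distinct first indices),
-- so the result does not depend on the set's iteration order; 'flat.index w' never raises here
-- (every w comes from flat), ported as '(index? flat w).getD 0' with the unreachable default 0.
def build_vocab_and_df_alt (docs : List (List String)) : (List (String × Int)) × (List (String × Int)) :=
  let flat := docs.flatMap (fun tokens => tokens)
  let words := PySem.List.sorted (PySem.Set.ofList flat) (fun w => (PySem.List.index? flat w).getD 0) false
  let vocab := PySem.Dict.mk ((PySem.List.enumerate words 0).map (fun p => (p.2, p.1)))
  let doc_freq := PySem.Dict.mk (words.map (fun w =>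
      (w, docs.foldl (fun n tokens => if tokens.contains w then n + 1 else n) (0 : Int))))
  (vocab.items, doc_freq.items)

-- ===== PRECONDITION & SPEC =====
def Spec_build_vocab_and_df (docs : List (List String)) (out : (List (String × Int)) × (List (String × Int))) : Prop := out = build_vocab_and_df_alt docs
instance (docs : List (List String)) (out : (List (String × Int)) × (List (String × Int))) : Decidable (Spec_build_vocab_and_df docs out) := by unfold Spec_build_vocab_and_df; infer_instance

-- ===== CLAIM (what is proved, stated in full; the proofs are below) =====
def Claim_equal_build_vocab_and_df : Prop := ∀ (docs : List (List String)), Dom_build_vocab_and_df docs → Spec_build_vocab_and_df docs (build_vocab_and_df docs)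

-- ===== LEMMAS AND PROOFS =====

-- the vocab dict that assigns index i to the i-th word of ws
def pvE (ws : List String) : PySem.Dict String Int :=
  PySem.Dict.mk ((PySem.List.enumerate ws 0).map (fun p => (p.2, p.1)))

theorem pvE_keys (ws : List String) : (pvE ws).keys = ws := by
  simp only [pvE, PySem.Dict.keys, List.map_map, Function.comp_def]
  exact PySem.List.map_snd_enumerate ws 0

-- A's doc_freq loop body and the vocab loop body, named for the proofs
def pvDStep (d : PySem.Dict String Int) (tokens : List String) : PySem.Dict String Int :=
  (PySem.Set.ofList tokens).foldl (fun d w => d.insert w (d.getD w 0 + 1)) d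

def pvVStep (p : PySem.Dict String Int × Int) (tokens : List String) : PySem.Dict String Int × Int :=
  tokens.foldl
    (fun (p : PySem.Dict String Int × Int) w =>
      if p.1.contains w then p else (p.1.insert w p.2, p.2 + 1)) p

theorem pvAStep_decompose (ds : List (List String)) (v : PySem.Dict String Int)
    (d : PySem.Dict String Int) (i : Int) :
    ds.foldl pvAStep (v, d, i)
      = ((ds.foldl pvVStep (v, i)).1, ds.foldl pvDStep d, (ds.foldl pvVStep (v, i)).2) := by
  induction ds generalizing v d i with
  | nil => rfl
  | cons t ds ih => simpa [pvAStep, pvDStep, pvVStep] using ih _ _ _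

-- vocab loop over one flat token list, from the state reached after ws
theorem pv_v_inner (l ws : List String) (hnd : ws.Nodup) :
    l.foldl
      (fun (p : PySem.Dict String Int × Int) w =>
        if p.1.contains w then p else (p.1.insert w p.2, p.2 + 1))
      (pvE ws, (ws.length : Int))
    = (pvE (PySem.Set.update ws l), ((PySem.Set.update ws l).length : Int)) := by
  induction l generalizing ws with
  | nil => rfl
  | cons w l ih =>
    by_cases hw : w ∈ ws
    · have hc : (pvE ws).contains w = true := by
        rw [PySem.Dict.contains_eq_decide_mem_keys, pvE_keys]; simpa using hw
      have hadd : PySem.Set.add ws w = ws := by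
        simp [PySem.Set.add, PySem.Set.contains, hw]
      simpa [hc, PySem.Set.update, hadd] using ih ws hnd
    · have hc : (pvE ws).contains w = false := by
        rw [PySem.Dict.contains_eq_decide_mem_keys, pvE_keys]; simpa using hw
      have hadd : PySem.Set.add ws w = ws ++ [w] := by
        simp [PySem.Set.add, PySem.Set.contains, hw]
      have hins : (pvE ws).insert w (ws.length : Int) = pvE (ws ++ [w]) := by
        apply PySem.Dict.ext
        rw [PySem.Dict.items_insert_of_not_contains _ _ hc]
        simp [pvE, PySem.List.enumerate_append, PySem.List.enumerate]
      have hnd' : (ws ++ [w]).Nodup := by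
        rw [List.nodup_append]
        refine ⟨hnd, List.nodup_singleton w, ?_⟩
        intro a ha b hb
        rw [List.mem_singleton] at hb
        exact fun heq => hw (hb ▸ heq ▸ ha)
      have := ih (ws ++ [w]) hnd'
      simp only [List.foldl_cons, hc, if_neg, Bool.false_eq_true, not_false_iff, hins]
      rw [show ((ws.length : Int) + 1) = (((ws ++ [w]).length : Nat) : Int) by simp]
      simpa [PySem.Set.update, hadd] using this

-- nested token loops over docs = one loop over the flattened stream
theorem pv_v_flat (ds : List (List String)) (p : PySem.Dict String Int × Int) :
    ds.foldl pvVStep p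
      = (ds.flatMap (fun t => t)).foldl
          (fun (p : PySem.Dict String Int × Int) w =>
            if p.1.contains w then p else (p.1.insert w p.2, p.2 + 1)) p := by
  induction ds generalizing p with
  | nil => rfl
  | cons t ds ih => rw [List.foldl_cons, ih, List.flatMap_cons, List.foldl_append]; rfl

-- A's nested doc_freq loops = one counting loop over the flattened per-doc-deduped stream
theorem pv_d_flat (ds : List (List String)) (d : PySem.Dict String Int) :
    ds.foldl pvDStep d
      = (ds.flatMap (fun tokens => PySem.List.dedup tokens)).foldl
          (fun d w => d.insert w (d.getD w 0 + 1)) d := by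
  induction ds generalizing d with
  | nil => rfl
  | cons t ds ih =>
    rw [List.foldl_cons, ih, List.flatMap_cons, List.foldl_append]
    rfl

-- a present element's first index is below the list's length
theorem pv_index_lt (l : List String) (a : String) (h : a ∈ l) :
    (PySem.List.index? l a).getD 0 < l.length := by
  have hs : (PySem.List.index? l a).isSome := (PySem.List.index?_isSome_iff l a).2 h
  obtain ⟨k, hk⟩ := Option.isSome_iff_exists.1 hs
  obtain ⟨pre, suf, hl, hlen, -⟩ := (PySem.List.index?_eq_some_iff l a k).1 hk
  rw [hk]
  subst hl
  simp [← hlen]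

-- dedup of a list is strictly increasing in first-occurrence index
theorem pv_dedup_pairwise_index (l : List String) :
    (PySem.List.dedup l).Pairwise
      (fun a b => (PySem.List.index? l a).getD 0 < (PySem.List.index? l b).getD 0) := by
  induction l using List.reverseRecOn with
  | nil => simp
  | append_singleton l x ih =>
    simp only [PySem.List.dedup_eq_ofList] at ih ⊢
    rw [PySem.Set.ofList_append_singleton]
    by_cases hx : x ∈ PySem.Set.ofList l
    · rw [PySem.Set.add_of_mem hx]
      refine ih.imp_of_mem ?_
      intro a b ha hb hab
      have ha' : a ∈ l := (PySem.Set.mem_ofList _ _).1 ha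
      have hb' : b ∈ l := (PySem.Set.mem_ofList _ _).1 hb
      rwa [PySem.List.index?_append_of_mem _ ha', PySem.List.index?_append_of_mem _ hb']
    · rw [PySem.Set.add_of_not_mem hx]
      rw [List.pairwise_append]
      have hxl : x ∉ l := fun h => hx ((PySem.Set.mem_ofList _ _).2 h)
      refine ⟨?_, List.pairwise_singleton _ _, ?_⟩
      · refine ih.imp_of_mem ?_
        intro a b ha hb hab
        have ha' : a ∈ l := (PySem.Set.mem_ofList _ _).1 ha
        have hb' : b ∈ l := (PySem.Set.mem_ofList _ _).1 hb
        rwa [PySem.List.index?_append_of_mem _ ha', PySem.List.index?_append_of_mem _ hb']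
      · intro a ha b hb
        rw [List.mem_singleton] at hb
        subst hb
        have ha' : a ∈ l := (PySem.Set.mem_ofList _ _).1 ha
        rw [PySem.List.index?_append_of_mem _ ha', PySem.List.index?_append_singleton_self _ _ hxl]
        simpa using pv_index_lt l a ha'

-- the stable sort by first index leaves the dedup order unchanged
theorem pv_words_eq_dedup (flat : List String) :
    PySem.List.sorted (PySem.Set.ofList flat) (fun w => (PySem.List.index? flat w).getD 0) false
      = PySem.List.dedup flat := by
  apply PySem.List.sorted_eq_of_perm_of_pairwise_lt
  · rw [PySem.List.dedup_eq_ofList]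
  · exact pv_dedup_pairwise_index flat

-- adding a list to a set = adding its dedup (same new elements, same order)
theorem pv_update_dedup (s : PySem.Set String) (t : List String) :
    PySem.Set.update s (PySem.List.dedup t) = PySem.Set.update s t := by
  rw [PySem.Set.update_eq_append_filter, PySem.Set.update_eq_append_filter,
    PySem.List.dedup_eq_ofList, PySem.Set.ofList_ofList]

-- dedup of the flattened per-doc-deduped stream = dedup of the flattened stream
theorem pv_update_flat_dedup (ds : List (List String)) (s : PySem.Set String) :
    PySem.Set.update s (ds.flatMap (fun tokens => PySem.List.dedup tokens))
      = PySem.Set.update s (ds.flatMap (fun t => t)) := by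
  induction ds generalizing s with
  | nil => rfl
  | cons t ds ih =>
    rw [List.flatMap_cons, List.flatMap_cons, PySem.Set.update_append, PySem.Set.update_append,
      pv_update_dedup, ih]

theorem pv_dedup_flat (ds : List (List String)) :
    PySem.List.dedup (ds.flatMap (fun tokens => PySem.List.dedup tokens))
      = PySem.List.dedup (ds.flatMap (fun t => t)) := by
  rw [PySem.List.dedup_eq_ofList, PySem.List.dedup_eq_ofList,
    ← PySem.Set.update_nil_left, ← PySem.Set.update_nil_left, pv_update_flat_dedup]

-- count of w in the per-doc-deduped stream = B's number of documents containing w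
theorem pv_count_docs (ds : List (List String)) (w : String) :
    (((ds.flatMap (fun tokens => PySem.List.dedup tokens)).count w : Nat) : Int)
      = ds.foldl (fun n tokens => if tokens.contains w then n + 1 else n) (0 : Int) := by
  rw [PySem.List.foldl_if_add_one]
  have h : (ds.flatMap (fun tokens => PySem.List.dedup tokens)).count w
      = ds.countP (fun tokens => tokens.contains w) := by
    induction ds with
    | nil => rfl
    | cons t ds ih =>
      have hone : List.count w (PySem.List.dedup t) = if t.contains w then 1 else 0 := by
        by_cases hw : w ∈ t
        · rw [if_pos (show t.contains w = true by simpa using hw)]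
          exact List.count_eq_one_of_mem (PySem.List.nodup_dedup t)
            ((PySem.List.mem_dedup _ _).2 hw)
        · rw [if_neg (show ¬ t.contains w = true by simpa using hw)]
          exact List.count_eq_zero.2 (fun hc => hw ((PySem.List.mem_dedup _ _).1 hc))
      rw [List.flatMap_cons, List.count_append, hone, ih, List.countP_cons, Nat.add_comm]
  rw [h]
  omega

-- A's doc_freq (as a counter over the per-doc-deduped stream) has exactly B's items
theorem pv_df_items (docs : List (List String)) :
    (PySem.Dict.counter (docs.flatMap (fun tokens => PySem.List.dedup tokens))).items
      = (PySem.List.dedup (docs.flatMap (fun t => t))).map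
          (fun w => (w, docs.foldl (fun n tokens => if tokens.contains w then n + 1 else n) (0 : Int))) := by
  rw [PySem.Dict.items_counter, ← PySem.List.dedup_eq_ofList, pv_dedup_flat]
  exact List.map_congr_left (fun w _ => by rw [pv_count_docs])

-- ===== VERDICT (by name: the statement is the Claim_ definition above) =====
theorem build_vocab_and_df_spec : Claim_equal_build_vocab_and_df := by
  intro docs _
  show build_vocab_and_df docs = build_vocab_and_df_alt docs
  rw [build_vocab_and_df, build_vocab_and_df_alt]
  rw [pvAStep_decompose docs PySem.Dict.empty PySem.Dict.empty 0]
  have hEempty : (PySem.Dict.empty : PySem.Dict String Int) = pvE [] := by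
    apply PySem.Dict.ext; rfl
  have hwords := pv_words_eq_dedup (docs.flatMap (fun tokens => tokens))
  have hdedup : PySem.List.dedup (docs.flatMap (fun t => t))
      = PySem.Set.update ([] : PySem.Set String) (docs.flatMap (fun t => t)) := rfl
  have hv := pv_v_inner (docs.flatMap (fun t => t)) [] (by simp)
  simp only [List.length_nil, Nat.cast_zero] at hv
  rw [pv_v_flat, hEempty, hv]
  refine congrArg₂ Prod.mk ?_ ?_
  · show (pvE _).items = _
    rw [hwords, hdedup]
    rfl
  · show (docs.foldl pvDStep (pvE [])).items = _
    rw [show pvE [] = PySem.Dict.empty from rfl, pv_d_flat,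
      PySem.Dict.foldl_insert_getD_add_one_eq_counter, pv_df_items, hwords, hdedup]
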